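-- pv_equiv track=rewrite | github.com/omicsNLP/MetaboliteNER | chemtok/StringTools.py | isLackingOpenBracket
-- ===== SOURCE A (Python) =====
-- def isLackingOpenBracket(s):
-- 	"""
-- 	Would adding an open bracket to the start of the string make it balanced?
-- 	E.g. "example)" would return true, whereas "example", "(example)" and "(example"
-- 	would return false.
--
-- 	Args:
-- 		s: The string to test.
--
-- 	Returns:
-- 		Whether an open bracket would balance the string.
-- 	"""
-- 	bracketLevel = 0
-- 	for c in s:
-- 	  if c in '([{':
-- 		  bracketLevel += 1
-- 	  elif c in ')]}':
-- 		  bracketLevel -= 1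
-- 	  if bracketLevel == -1:
-- 		  return True
-- 	return False
-- ===== SOURCE B (Python) =====
-- def isLackingOpenBracket(s):
--     """Would adding an open bracket to the start of the string make it balanced?"""
--     def agg(chars):
--         # returns (total balance, minimum prefix balance) of the segment,
--         # combined divide-and-conquer: minpref(L+R) = min(minpref L, total L + minpref R)
--         if not chars:
--             return (0, 0)
--         if len(chars) == 1:
--             c = chars[0]
--             w = 1 if c in '([{' else -1 if c in ')]}' else 0
--             return (w, min(0, w))
--         k = len(chars) // 2
--         t1, m1 = agg(chars[:k])
--         t2, m2 = agg(chars[k:])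
--         return (t1 + t2, min(m1, t1 + m2))
--     return agg(list(s))[1] <= -1
-- ===== Notes on version B (the rewrite author's own statement) =====
-- stated objective: alternative
-- what changed: Replaces A's left-to-right stateful scan with early return by a divide-and-conquer aggregation: each half of the string is summarised as a (total balance, minimum prefix balance) pair and the pairs are combined with the monoid rule minpref(L+R)=min(minpref L, total L + minpref R); the answer is whether the whole string's minimum prefix balance is <= -1.
import Mathlib
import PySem

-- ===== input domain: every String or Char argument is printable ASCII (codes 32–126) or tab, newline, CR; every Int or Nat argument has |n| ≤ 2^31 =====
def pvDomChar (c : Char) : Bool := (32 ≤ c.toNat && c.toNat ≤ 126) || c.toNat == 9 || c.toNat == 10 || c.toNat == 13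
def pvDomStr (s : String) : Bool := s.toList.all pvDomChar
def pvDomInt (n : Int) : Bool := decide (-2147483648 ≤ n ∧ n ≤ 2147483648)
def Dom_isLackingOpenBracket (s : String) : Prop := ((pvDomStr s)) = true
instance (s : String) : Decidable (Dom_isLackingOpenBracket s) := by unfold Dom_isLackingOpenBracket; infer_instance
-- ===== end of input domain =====

-- B replaces A's sequential stateful scan by a divide-and-conquer (total, min-prefix) aggregation (alternative algorithm, same cost).

-- ===== PORT A =====
-- A's loop: update bracketLevel per character, return True as soon as it equals -1.
def pvALoop : List Char → Int → Bool
  | [], _ => false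
  | c :: cs, level =>
    let level := if "([{".toList.contains c then level + 1
                 else if ")]}".toList.contains c then level - 1
                 else level
    if level = -1 then true else pvALoop cs level

def isLackingOpenBracket (s : String) : Bool := pvALoop s.toList 0

-- ===== PORT B =====
-- weight of a single character, as in Source B's conditional expression
def pvWeight (c : Char) : Int :=
  if "([{".toList.contains c then 1
  else if ")]}".toList.contains c then -1
  else 0

-- Source B's agg: (total balance, minimum prefix balance) of a segment, divide and conquer
def pvAgg : List Char → Int × Int
  | [] => (0, 0)
  | [c] => (pvWeight c, min 0 (pvWeight c))
  | c1 :: c2 :: rest =>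
    let cs := c1 :: c2 :: rest
    let k := cs.length / 2
    let p1 := pvAgg (cs.take k)
    let p2 := pvAgg (cs.drop k)
    (p1.1 + p2.1, min p1.2 (p1.1 + p2.2))
termination_by cs => cs.length
decreasing_by
  · simp; omega
  · simp; omega

def isLackingOpenBracket_alt (s : String) : Bool := decide ((pvAgg s.toList).2 ≤ -1)

-- ===== PRECONDITION & SPEC =====
def Spec_isLackingOpenBracket (s : String) (out : Bool) : Prop := out = isLackingOpenBracket_alt s
instance (s : String) (out : Bool) : Decidable (Spec_isLackingOpenBracket s out) := by unfold Spec_isLackingOpenBracket; infer_instance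

-- ===== CLAIM (what is proved, stated in full; the proofs are below) =====
def Claim_equal_isLackingOpenBracket : Prop := ∀ (s : String), Dom_isLackingOpenBracket s → Spec_isLackingOpenBracket s (isLackingOpenBracket s)

-- ===== LEMMAS AND PROOFS =====

-- reference semantics: total balance and minimum prefix balance (empty prefix included), sequentially
def pvTotal : List Char → Int
  | [] => 0
  | c :: cs => pvWeight c + pvTotal cs

def pvMinPref : List Char → Int
  | [] => 0
  | c :: cs => min 0 (pvWeight c + pvMinPref cs)

theorem pvMinPref_nonpos (cs : List Char) : pvMinPref cs ≤ 0 := by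
  cases cs <;> simp [pvMinPref]

theorem pvTotal_append (a b : List Char) :
    pvTotal (a ++ b) = pvTotal a + pvTotal b := by
  induction a with
  | nil => simp [pvTotal]
  | cons c cs ih => simp [pvTotal, ih]; ring

theorem pvMinPref_append (a b : List Char) :
    pvMinPref (a ++ b) = min (pvMinPref a) (pvTotal a + pvMinPref b) := by
  induction a with
  | nil =>
    have := pvMinPref_nonpos b
    simp only [List.nil_append, pvMinPref, pvTotal]
    omega
  | cons c cs ih =>
    simp only [List.cons_append, pvMinPref, pvTotal, ih]
    omega

theorem pvAgg_eq (cs : List Char) : pvAgg cs = (pvTotal cs, pvMinPref cs) := by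
  match cs with
  | [] => simp [pvAgg, pvTotal, pvMinPref]
  | [c] => simp [pvAgg, pvTotal, pvMinPref]
  | c1 :: c2 :: rest =>
    have h1 := pvAgg_eq ((c1 :: c2 :: rest).take ((c1 :: c2 :: rest).length / 2))
    have h2 := pvAgg_eq ((c1 :: c2 :: rest).drop ((c1 :: c2 :: rest).length / 2))
    have h : (c1 :: c2 :: rest).take ((c1 :: c2 :: rest).length / 2) ++
        (c1 :: c2 :: rest).drop ((c1 :: c2 :: rest).length / 2) = c1 :: c2 :: rest :=
      List.take_append_drop _ _
    simp only [pvAgg, h1, h2]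
    rw [show pvTotal (c1 :: c2 :: rest) = _ from by rw [← h, pvTotal_append],
        show pvMinPref (c1 :: c2 :: rest) = _ from by rw [← h, pvMinPref_append]]
termination_by cs.length
decreasing_by
  · simp; omega
  · simp; omega

theorem pvWeight_ge (c : Char) : -1 ≤ pvWeight c := by
  unfold pvWeight; split_ifs <;> omega

-- A's early-return scan reaches -1 from a nonnegative start iff the min prefix drops to -1
theorem pvALoop_iff (cs : List Char) (L : Int) (hL : 0 ≤ L) :
    pvALoop cs L = true ↔ L + pvMinPref cs ≤ -1 := by
  induction cs generalizing L with
  | nil => simp [pvALoop, pvMinPref]; omega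
  | cons c cs ih =>
    have hstep : (if "([{".toList.contains c then L + 1
        else if ")]}".toList.contains c then L - 1
        else L) = L + pvWeight c := by
      unfold pvWeight; split_ifs <;> omega
    have hw := pvWeight_ge c
    have hm := pvMinPref_nonpos cs
    simp only [pvALoop, hstep, pvMinPref]
    by_cases h : L + pvWeight c = -1
    · simp [h]; omega
    · have hpos : 0 ≤ L + pvWeight c := by omega
      simp [h, ih _ hpos]; omega

-- ===== VERDICT (by name: the statement is the Claim_ definition above) =====
theorem isLackingOpenBracket_spec : Claim_equal_isLackingOpenBracket := by
  intro s _
  unfold Spec_isLackingOpenBracket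
  simp only [isLackingOpenBracket, isLackingOpenBracket_alt, pvAgg_eq]
  rw [Bool.eq_iff_iff, pvALoop_iff s.toList 0 le_rfl]
  simp
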